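-- pv_equiv track=rewrite | github.com/Aarif123456/cs | Algorithms/Data Structure dependent/Stacks and Queue/monotonic/subarray.py | count_max_heads
-- ===== SOURCE A (Python) =====
-- def count_max_heads(nums):
--     stack = [] # Mono decreasing stack
--     ans = list(range(len(nums) - 1, -1, -1))
--
--     for i, n in enumerate(nums):
--         while stack and n >= stack[-1][1]:
--             prev_idx, _ = stack.pop()
--             ans[prev_idx] = i - prev_idx - 1
--         stack.append((i, n))
--     return ans
-- ===== SOURCE B (Python) =====
-- def count_max_heads(nums):
--     n = len(nums)
--     ans = []
--     for i in range(n):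
--         cnt = n - 1 - i
--         for j in range(i + 1, n):
--             if nums[j] >= nums[i]:
--                 cnt = j - i - 1
--                 break
--         ans.append(cnt)
--     return ans
-- ===== Notes on version B (the rewrite author's own statement) =====
-- stated objective: simpler
-- what changed: Replaced the single-pass monotonic-stack algorithm with a plain nested forward scan: for each index i, count elements until the first later element >= nums[i], defaulting to len-1-i.
import Mathlib
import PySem

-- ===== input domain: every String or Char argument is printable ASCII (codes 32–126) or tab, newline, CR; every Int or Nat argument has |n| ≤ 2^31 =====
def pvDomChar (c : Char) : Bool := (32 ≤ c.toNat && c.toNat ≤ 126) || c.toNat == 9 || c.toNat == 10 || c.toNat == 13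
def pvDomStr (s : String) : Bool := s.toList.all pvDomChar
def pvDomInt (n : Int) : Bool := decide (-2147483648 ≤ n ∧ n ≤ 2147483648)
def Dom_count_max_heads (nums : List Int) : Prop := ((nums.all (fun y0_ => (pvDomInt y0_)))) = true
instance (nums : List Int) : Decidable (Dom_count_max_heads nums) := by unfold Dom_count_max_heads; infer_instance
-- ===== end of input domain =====

-- B replaces A's single-pass monotonic stack by a plain nested forward scan (simpler, O(n^2) vs A's O(n)); same return value, no mutation visible to the caller.

-- ===== PORT A =====
-- the inner `while stack and n >= stack[-1][1]` loop (stack top = list head; pop = tail, append = cons)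
def pvPopLoop (i v : Int) : List (Int × Int) → List Int → (List (Int × Int)) × List Int
  | [], ans => ([], ans)
  | (pj, pv) :: st, ans =>
      if v ≥ pv then pvPopLoop i v st (PySem.List.pySetD ans pj (i - pj - 1))
      else ((pj, pv) :: st, ans)

-- one iteration of `for i, n in enumerate(nums)`
def pvStep (s : List (Int × Int) × List Int) (p : Int × Int) : List (Int × Int) × List Int :=
  let r := pvPopLoop p.1 p.2 s.1 s.2
  (p :: r.1, r.2)

def count_max_heads (nums : List Int) : List Int :=
  ((PySem.List.enumerate nums).foldl pvStep
    ([], PySem.List.pyRange ((nums.length : Int) - 1) (-1) (-1))).2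

-- ===== PORT B =====
-- the inner `for j in range(i+1, n): if nums[j] >= nums[i]: … break` scan: offset of the first element ≥ v
def pvFindGE (v : Int) : List Int → Option Nat
  | [] => none
  | x :: xs => if v ≤ x then some 0 else (pvFindGE v xs).map (· + 1)

def count_max_heads_alt (nums : List Int) : List Int :=
  (List.range nums.length).map fun i =>
    match pvFindGE (nums.getD i 0) (nums.drop (i + 1)) with
    | some k => (k : Int)
    | none => (nums.length : Int) - 1 - i

-- ===== PRECONDITION & SPEC =====
def Spec_count_max_heads (nums : List Int) (out : List Int) : Prop := out = count_max_heads_alt nums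
instance (nums : List Int) (out : List Int) : Decidable (Spec_count_max_heads nums out) := by unfold Spec_count_max_heads; infer_instance

-- ===== CLAIM (what is proved, stated in full; the proofs are below) =====
def Claim_equal_count_max_heads : Prop := ∀ (nums : List Int), Dom_count_max_heads nums → Spec_count_max_heads nums (count_max_heads nums)

-- ===== LEMMAS AND PROOFS =====

-- what ans[j] holds after the first m elements of nums have been processed
def pvAnsSpec (nums : List Int) (m j : Nat) : Int :=
  match pvFindGE (nums.getD j 0) ((nums.take m).drop (j + 1)) with
  | some k => (k : Int)
  | none => (nums.length : Int) - 1 - j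

-- loop invariant of A: stack values strictly increase towards the tail, the stack holds exactly
-- the indices < m with no later element ≥ them among the first m, and ans agrees with pvAnsSpec
def pvInv (nums : List Int) (m : Nat) (st : List (Int × Int)) (ans : List Int) : Prop :=
  st.Pairwise (fun a b => a.2 < b.2) ∧
  (∀ p ∈ st, ∃ j : Nat, p.1 = (j : Int) ∧ j < m ∧ p.2 = nums.getD j 0 ∧
      pvFindGE p.2 ((nums.take m).drop (j + 1)) = none) ∧
  (∀ j : Nat, j < m → pvFindGE (nums.getD j 0) ((nums.take m).drop (j + 1)) = none →
      ((j : Int), nums.getD j 0) ∈ st) ∧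
  ans.length = nums.length ∧
  (∀ j : Nat, j < nums.length → ans.getD j 0 = pvAnsSpec nums m j)

lemma pvFindGE_append (v : Int) (xs ys : List Int) :
    pvFindGE v (xs ++ ys) =
      match pvFindGE v xs with
      | some k => some k
      | none => (pvFindGE v ys).map (· + xs.length) := by
  induction xs with
  | nil => simp [pvFindGE]
  | cons x xs ih =>
    by_cases h : v ≤ x
    · simp [pvFindGE, h]
    · simp only [List.cons_append, pvFindGE, if_neg h, ih]
      cases hx : pvFindGE v xs with
      | some k => simp
      | none =>
        cases hy : pvFindGE v ys with
        | none => simp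
        | some k => simp [List.length_cons]; omega

lemma pvFindGE_append_some {v : Int} {xs : List Int} {k : Nat} (ys : List Int)
    (h : pvFindGE v xs = some k) : pvFindGE v (xs ++ ys) = some k := by
  rw [pvFindGE_append, h]

lemma pvFindGE_append_none_singleton {v : Int} {xs : List Int} (w : Int)
    (h : pvFindGE v xs = none) :
    pvFindGE v (xs ++ [w]) = if v ≤ w then some xs.length else none := by
  rw [pvFindGE_append, h]
  by_cases hw : v ≤ w <;> simp [pvFindGE, hw]

lemma pvFindGE_none_of_append {v : Int} {xs ys : List Int}
    (h : pvFindGE v (xs ++ ys) = none) : pvFindGE v xs = none := by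
  rw [pvFindGE_append] at h
  cases hx : pvFindGE v xs with
  | none => rfl
  | some k => rw [hx] at h; exact absurd h (by simp)

lemma pvPopLoop_eq (i v : Int) (st : List (Int × Int)) (ans : List Int) :
    pvPopLoop i v st ans =
      (st.dropWhile (fun p => decide (p.2 ≤ v)),
       (st.takeWhile (fun p => decide (p.2 ≤ v))).foldl
         (fun a p => PySem.List.pySetD a p.1 (i - p.1 - 1)) ans) := by
  induction st generalizing ans with
  | nil => simp [pvPopLoop]
  | cons p st ih =>
    obtain ⟨pj, pv⟩ := p
    by_cases h : pv ≤ v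
    · simp [pvPopLoop, h, ih, ge_iff_le]
    · simp [pvPopLoop, h, ge_iff_le]

lemma pvFoldlSet_length (l : List (Int × Int)) (ans : List Int) (i : Int) :
    (l.foldl (fun a p => PySem.List.pySetD a p.1 (i - p.1 - 1)) ans).length = ans.length := by
  induction l generalizing ans with
  | nil => rfl
  | cons p tl ih => simp [ih, PySem.List.length_pySetD]

lemma pvGetD_set (ans : List Int) (k j : Nat) (w : Int) (hj : j < ans.length) :
    (ans.set k w).getD j 0 = if k = j then w else ans.getD j 0 := by
  simp [List.getD_eq_getElem?_getD, List.getElem?_set]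
  split <;> simp_all

lemma pvFoldlSet_getD (l : List (Int × Int)) (ans : List Int) (i : Int) (j : Nat)
    (hl : ∀ p ∈ l, ∃ k : Nat, p.1 = (k : Int)) (hj : j < ans.length) :
    (l.foldl (fun a p => PySem.List.pySetD a p.1 (i - p.1 - 1)) ans).getD j 0 =
      if ((j : Int)) ∈ l.map Prod.fst then i - j - 1 else ans.getD j 0 := by
  induction l generalizing ans with
  | nil => simp
  | cons p tl ih =>
    obtain ⟨k, hk⟩ := hl p (by simp)
    have hset : PySem.List.pySetD ans p.1 (i - p.1 - 1) = ans.set k (i - p.1 - 1) := by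
      rw [hk, PySem.List.pySetD_natCast]
    rw [List.foldl_cons, ih _ (fun q hq => hl q (by simp [hq])) (by rw [hset]; simpa using hj)]
    by_cases hjtl : ((j : Int)) ∈ tl.map Prod.fst
    · simp [hjtl]
    · rw [if_neg hjtl, hset, pvGetD_set ans k j _ hj]
      by_cases hkj : k = j
      · subst hkj
        rw [if_pos rfl, if_pos (by simp [hk]), hk]
      · rw [if_neg hkj, if_neg (by
          simp only [List.map_cons, List.mem_cons]
          rintro (hh | hh)
          · rw [hk] at hh; exact hkj (by exact_mod_cast hh.symm)
          · exact hjtl hh)]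

lemma pvKept_not_le (v : Int) (st : List (Int × Int))
    (hpw : st.Pairwise (fun a b => a.2 < b.2)) :
    ∀ p ∈ st.dropWhile (fun q => decide (q.2 ≤ v)), ¬ (p.2 ≤ v) := by
  induction st with
  | nil => simp
  | cons a tl ih =>
    intro p hmem
    rw [List.dropWhile_cons] at hmem
    by_cases h : a.2 ≤ v
    · simp only [h, decide_true, if_true] at hmem
      exact ih (List.Pairwise.of_cons hpw) p hmem
    · rw [if_neg (by simpa using h)] at hmem
      rcases List.mem_cons.mp hmem with h1 | h1
      · rw [h1]; exact h
      · have := (List.pairwise_cons.mp hpw).1 p h1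
        omega

lemma pvEnumerate_getElem? (nums : List Int) (s : Int) (k : Nat) :
    (PySem.List.enumerate nums s)[k]? = nums[k]?.map (fun x => (s + (k : Int), x)) := by
  induction nums generalizing s k with
  | nil => simp [PySem.List.enumerate_nil]
  | cons x xs ih =>
    cases k with
    | zero => simp [PySem.List.enumerate_cons]
    | succ k =>
      have hc : s + ((k + 1 : Nat) : Int) = (s + 1) + (k : Int) := by push_cast; ring
      simp only [PySem.List.enumerate_cons, List.getElem?_cons_succ, ih, hc]

lemma pvInit_length (nums : List Int) :
    (PySem.List.pyRange ((nums.length : Int) - 1) (-1) (-1)).length = nums.length := by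
  rw [PySem.List.pyRange_neg_one]
  simp only [List.length_map, List.length_range]
  omega

lemma pvInit_getD (nums : List Int) (j : Nat) (hj : j < nums.length) :
    (PySem.List.pyRange ((nums.length : Int) - 1) (-1) (-1)).getD j 0 =
      (nums.length : Int) - 1 - j := by
  rw [PySem.List.pyRange_neg_one]
  have hn : (((nums.length : Int) - 1) - (-1)).toNat = nums.length := by omega
  rw [hn]
  exact PySem.List.getD_map_range _ _ _ _ hj

lemma pvInv_zero (nums : List Int) :
    pvInv nums 0 [] (PySem.List.pyRange ((nums.length : Int) - 1) (-1) (-1)) := by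
  refine ⟨List.Pairwise.nil, by simp, by omega, pvInit_length nums, ?_⟩
  intro j hj
  rw [pvInit_getD nums j hj]
  simp [pvAnsSpec, pvFindGE]

lemma pvInv_step (nums : List Int) (m : Nat) (st : List (Int × Int)) (ans : List Int)
    (hm : m < nums.length) (h : pvInv nums m st ans) :
    pvInv nums (m + 1)
      (((m : Int), nums.getD m 0) :: (pvPopLoop (m : Int) (nums.getD m 0) st ans).1)
      ((pvPopLoop (m : Int) (nums.getD m 0) st ans).2) := by
  obtain ⟨hpw, hmem, hcomplete, hlen, hans⟩ := h
  rw [pvPopLoop_eq]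
  have hv' : nums.getD m 0 = nums[m] := List.getD_eq_getElem nums 0 hm
  have hsplit : st.takeWhile (fun p => decide (p.2 ≤ nums.getD m 0)) ++
      st.dropWhile (fun p => decide (p.2 ≤ nums.getD m 0)) = st :=
    List.takeWhile_append_dropWhile
  have hpop_st : ∀ p ∈ st.takeWhile (fun p => decide (p.2 ≤ nums.getD m 0)), p ∈ st := by
    intro p hp; rw [← hsplit]; exact List.mem_append_left _ hp
  have hkept_st : ∀ p ∈ st.dropWhile (fun p => decide (p.2 ≤ nums.getD m 0)), p ∈ st := by
    intro p hp; rw [← hsplit]; exact List.mem_append_right _ hp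
  have hpop_le : ∀ p ∈ st.takeWhile (fun p => decide (p.2 ≤ nums.getD m 0)),
      p.2 ≤ nums.getD m 0 := by
    intro p hp; simpa using List.mem_takeWhile_imp hp
  have hkept_gt := pvKept_not_le (nums.getD m 0) st hpw
  have htklen : (nums.take m).length = m := by simp [List.length_take]; omega
  have hsfx : ∀ j : Nat, j < m →
      (nums.take (m + 1)).drop (j + 1) = (nums.take m).drop (j + 1) ++ [nums.getD m 0] := by
    intro j hj
    rw [List.take_add_one, List.getElem?_eq_getElem hm]
    simp only [Option.toList_some]
    rw [List.drop_append_of_le_length (by omega), hv']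
  have hsfx_hi : ∀ j : Nat, m ≤ j → (nums.take (m + 1)).drop (j + 1) = [] := by
    intro j hj
    exact List.drop_eq_nil_of_le (by simp [List.length_take]; omega)
  have hsfx_hi' : ∀ j : Nat, m ≤ j → (nums.take m).drop (j + 1) = [] := by
    intro j hj
    exact List.drop_eq_nil_of_le (by omega)
  refine ⟨?_, ?_, ?_, ?_, ?_⟩
  · -- strictly increasing stack values
    refine List.pairwise_cons.mpr ⟨?_, List.Pairwise.sublist (List.dropWhile_sublist _) hpw⟩
    intro p hp
    have := hkept_gt p hp
    omega
  · -- every stack element is an unresolved index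
    intro p hp
    rcases List.mem_cons.mp hp with rfl | hp
    · exact ⟨m, rfl, by omega, rfl, by rw [hsfx_hi m le_rfl]; rfl⟩
    · obtain ⟨j, hj1, hj2, hj3, hj4⟩ := hmem p (hkept_st p hp)
      refine ⟨j, hj1, by omega, hj3, ?_⟩
      rw [hsfx j hj2, pvFindGE_append_none_singleton _ hj4, if_neg (hkept_gt p hp)]
  · -- every unresolved index is on the stack
    intro j hj hnone
    by_cases hjm : j = m
    · subst hjm; exact List.mem_cons_self
    · have hjm' : j < m := by omega
      rw [hsfx j hjm'] at hnone
      have hxs := pvFindGE_none_of_append hnone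
      have hin := hcomplete j hjm' hxs
      rw [← hsplit] at hin
      rcases List.mem_append.mp hin with hin | hin
      · exfalso
        have hle := hpop_le _ hin
        rw [pvFindGE_append_none_singleton _ hxs, if_pos hle] at hnone
        exact absurd hnone (by simp)
      · exact List.mem_cons_of_mem _ hin
  · rw [pvFoldlSet_length, hlen]
  · -- ans agrees with pvAnsSpec (m+1)
    intro j hjn
    have hl2 : ∀ p ∈ st.takeWhile (fun p => decide (p.2 ≤ nums.getD m 0)),
        ∃ k : Nat, p.1 = (k : Int) := by
      intro p hp
      obtain ⟨k, hk, _⟩ := hmem p (hpop_st p hp)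
      exact ⟨k, hk⟩
    rw [pvFoldlSet_getD _ ans _ j hl2 (by omega)]
    by_cases hjpop :
        ((j : Int)) ∈ (st.takeWhile (fun p => decide (p.2 ≤ nums.getD m 0))).map Prod.fst
    · -- j was just resolved: its first later ≥ element is nums[m]
      obtain ⟨p, hp, hpj⟩ := List.mem_map.mp hjpop
      obtain ⟨k, hk1, hk2, hk3, hk4⟩ := hmem p (hpop_st p hp)
      have hkj : k = j := by rw [hk1] at hpj; exact_mod_cast hpj
      subst hkj
      have hle : nums.getD k 0 ≤ nums.getD m 0 := by rw [← hk3]; exact hpop_le p hp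
      rw [if_pos hjpop]
      unfold pvAnsSpec
      rw [hsfx k hk2, pvFindGE_append_none_singleton _ (hk3 ▸ hk4), if_pos hle]
      have hdl : ((nums.take m).drop (k + 1)).length = m - (k + 1) := by
        simp [List.length_drop, htklen]
      rw [hdl]
      push_cast [Nat.cast_sub (by omega : k + 1 ≤ m)]
      ring
    · rw [if_neg hjpop, hans j hjn]
      unfold pvAnsSpec
      rcases Nat.lt_or_ge j m with hjm | hjm
      · rw [hsfx j hjm]
        cases hold : pvFindGE (nums.getD j 0) ((nums.take m).drop (j + 1)) with
        | some k => rw [pvFindGE_append_some _ hold]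
        | none =>
          have hin := hcomplete j hjm hold
          rw [← hsplit] at hin
          rcases List.mem_append.mp hin with hin | hin
          · exact absurd (List.mem_map.mpr ⟨_, hin, rfl⟩) hjpop
          · rw [pvFindGE_append_none_singleton _ hold, if_neg (hkept_gt _ hin)]
      · rw [hsfx_hi j hjm, hsfx_hi' j hjm]

lemma pvFold_inv (nums : List Int) : ∀ (l : List (Int × Int)) (m : Nat)
    (st : List (Int × Int)) (ans : List Int),
    l = (PySem.List.enumerate nums 0).drop m → pvInv nums m st ans →
    ((l.foldl pvStep (st, ans)).2.length = nums.length ∧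
     ∀ j : Nat, j < nums.length →
       (l.foldl pvStep (st, ans)).2.getD j 0 = pvAnsSpec nums nums.length j) := by
  intro l
  induction l with
  | nil =>
    intro m st ans hl hinv
    obtain ⟨_, _, _, hlen, hans⟩ := hinv
    have hnm : nums.length ≤ m := by
      by_contra hc
      have : ((PySem.List.enumerate nums 0).drop m) ≠ [] := by
        apply List.ne_nil_of_length_pos
        rw [List.length_drop, PySem.List.length_enumerate]
        omega
      exact this hl.symm
    refine ⟨hlen, ?_⟩
    intro j hj
    rw [List.foldl_nil, hans j hj]
    unfold pvAnsSpec
    rw [List.take_of_length_le hnm, List.take_length]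
  | cons p tl ih =>
    intro m st ans hl hinv
    have hm : m < nums.length := by
      by_contra hc
      rw [List.drop_eq_nil_of_le (by rw [PySem.List.length_enumerate]; omega)] at hl
      exact List.cons_ne_nil p tl hl
    have hmlen : m < (PySem.List.enumerate nums 0).length := by
      rw [PySem.List.length_enumerate]; exact hm
    have hget : (PySem.List.enumerate nums 0)[m] = ((m : Int), nums[m]) := by
      have := pvEnumerate_getElem? nums 0 m
      rw [List.getElem?_eq_getElem hmlen, List.getElem?_eq_getElem hm] at this
      simpa using this
    rw [List.drop_eq_getElem_cons hmlen, hget] at hl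
    obtain ⟨hp, htl⟩ : p = ((m : Int), nums[m]) ∧ tl = (PySem.List.enumerate nums 0).drop (m + 1) := by
      exact ⟨(List.cons.injEq _ _ _ _ ▸ hl).1, (List.cons.injEq _ _ _ _ ▸ hl).2⟩
    rw [List.foldl_cons]
    have hgd : nums[m] = nums.getD m 0 := (List.getD_eq_getElem nums 0 hm).symm
    have hstep : pvStep (st, ans) p =
        ((((m : Int), nums.getD m 0) :: (pvPopLoop (m : Int) (nums.getD m 0) st ans).1),
         (pvPopLoop (m : Int) (nums.getD m 0) st ans).2) := by
      rw [hp, hgd]; rfl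
    rw [hstep]
    exact ih (m + 1) _ _ htl (pvInv_step nums m st ans hm hinv)

lemma pvAlt_length (nums : List Int) : (count_max_heads_alt nums).length = nums.length := by
  simp [count_max_heads_alt]

lemma pvAlt_getD (nums : List Int) (j : Nat) (hj : j < nums.length) :
    (count_max_heads_alt nums).getD j 0 = pvAnsSpec nums nums.length j := by
  unfold count_max_heads_alt
  rw [PySem.List.getD_map_range _ _ _ _ hj]
  unfold pvAnsSpec
  rw [List.take_length]

-- ===== VERDICT (by name: the statement is the Claim_ definition above) =====
theorem count_max_heads_spec : Claim_equal_count_max_heads := by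
  intro nums _
  unfold Spec_count_max_heads
  have hmain := pvFold_inv nums (PySem.List.enumerate nums 0) 0 []
    (PySem.List.pyRange ((nums.length : Int) - 1) (-1) (-1))
    (by rw [List.drop_zero]) (pvInv_zero nums)
  have hA : count_max_heads nums =
      (((PySem.List.enumerate nums 0).foldl pvStep
        ([], PySem.List.pyRange ((nums.length : Int) - 1) (-1) (-1))).2) := rfl
  apply List.ext_getElem (by rw [hA, hmain.1, pvAlt_length])
  intro j h1 h2
  have hjn : j < nums.length := by rw [hA, hmain.1] at h1; exact h1
  have e1 : (count_max_heads nums).getD j 0 = pvAnsSpec nums nums.length j := by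
    rw [hA]; exact hmain.2 j hjn
  have e2 := pvAlt_getD nums j hjn
  rw [List.getD_eq_getElem _ 0 h1] at e1
  rw [List.getD_eq_getElem _ 0 h2] at e2
  rw [e1, e2]
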